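-- pv_equiv track=rewrite | github.com/lenylvt/DicteeCreator | app.py | replace_punctuation
-- ===== SOURCE A (Python) =====
-- def replace_punctuation(text):
--     replacements = {
--         ".": " point.",
--         ",": " virgule,",
--         ";": " point-virgule;",
--         ":": " deux-points:",
--         "!": " point d'exclamation!",
--         "?": " point d'interrogation?",
--     }
--     for key, value in replacements.items():
--         text = text.replace(key, value)
--     return text
-- ===== SOURCE B (Python) =====
-- _TABLE = str.maketrans({
--     ".": " point.",
--     ",": " virgule,",
--     ";": " point-virgule;",
--     ":": " deux-points:",
--     "!": " point d'exclamation!",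
--     "?": " point d'interrogation?",
-- })
--
--
-- def replace_punctuation(text):
--     return text.translate(_TABLE)
-- ===== Notes on version B (the rewrite author's own statement) =====
-- stated objective: idiomatic
-- what changed: Replaces six sequential whole-string str.replace passes with a single character-translation pass via str.maketrans/str.translate (one per-character table lookup instead of repeated full-string scans).
import Mathlib
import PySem

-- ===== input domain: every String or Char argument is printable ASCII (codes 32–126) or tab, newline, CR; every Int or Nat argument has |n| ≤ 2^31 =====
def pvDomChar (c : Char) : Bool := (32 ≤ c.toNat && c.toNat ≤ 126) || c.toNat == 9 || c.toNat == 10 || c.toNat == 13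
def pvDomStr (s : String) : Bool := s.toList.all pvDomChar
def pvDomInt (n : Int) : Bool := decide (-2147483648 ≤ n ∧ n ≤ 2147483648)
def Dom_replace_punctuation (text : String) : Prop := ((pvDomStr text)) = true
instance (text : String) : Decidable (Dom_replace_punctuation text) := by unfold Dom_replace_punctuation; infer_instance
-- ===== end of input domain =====

-- B replaces A's six sequential whole-string replace passes by a single character-translation
-- pass (str.maketrans/str.translate): a per-character table lookup applied in one recursion
-- over the characters (objective: idiomatic single pass).

-- ===== PORT A =====
-- six sequential str.replace passes, iterating over the dict items
def replace_punctuation (text : String) : String :=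
  let replacements : PySem.Dict String String := PySem.Dict.ofList
    [(".", " point."), (",", " virgule,"), (";", " point-virgule;"),
     (":", " deux-points:"), ("!", " point d'exclamation!"), ("?", " point d'interrogation?")]
  replacements.items.foldl (fun t kv => PySem.Str.replace t kv.1 kv.2) text

-- ===== PORT B =====
-- the translation table built by str.maketrans: one character to its expansion, identity otherwise
def pvTransChar (c : Char) : List Char :=
  if c = '.' then (" point.").toList
  else if c = ',' then (" virgule,").toList
  else if c = ';' then (" point-virgule;").toList
  else if c = ':' then (" deux-points:").toList
  else if c = '!' then (" point d'exclamation!").toList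
  else if c = '?' then (" point d'interrogation?").toList
  else [c]

-- str.translate: one pass over the characters, applying the table to each
def pvTranslate : List Char → List Char
  | [] => []
  | c :: rest => pvTransChar c ++ pvTranslate rest

def replace_punctuation_alt (text : String) : String :=
  String.ofList (pvTranslate text.toList)

-- ===== PRECONDITION & SPEC =====
def Spec_replace_punctuation (text : String) (out : String) : Prop := out = replace_punctuation_alt text
instance (text : String) (out : String) : Decidable (Spec_replace_punctuation text out) := by unfold Spec_replace_punctuation; infer_instance

-- ===== CLAIM (what is proved, stated in full; the proofs are below) =====
def Claim_equal_replace_punctuation : Prop := ∀ (text : String), Dom_replace_punctuation text → Spec_replace_punctuation text (replace_punctuation text)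

-- ===== LEMMAS AND PROOFS =====

-- single-char replace is a flatMap over the characters
lemma replace_go_single (k : Char) (new : List Char) :
    ∀ (fuel : Nat) (l acc : List Char), l.length ≤ fuel →
      PySem.Chars.replace.go [k] new fuel l acc =
        acc.reverse ++ l.flatMap (fun c => if c = k then new else [c]) := by
  intro fuel
  induction fuel with
  | zero =>
      intro l acc h
      have : l = [] := List.eq_nil_of_length_eq_zero (Nat.le_zero.mp h)
      subst this; simp [PySem.Chars.replace.go]
  | succ n ih =>
      intro l acc h
      cases l with
      | nil => simp [PySem.Chars.replace.go]
      | cons c t =>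
          by_cases hc : c = k
          · subst hc
            have hpre : List.isPrefixOf [c] (c :: t) = true := by
              simp [List.isPrefixOf]
            simp only [PySem.Chars.replace.go, hpre, if_pos, List.length_cons,
              List.length_nil, List.drop_succ_cons, List.drop_zero]
            rw [ih t (new.reverse ++ acc) (by simpa using Nat.lt_succ_iff.mp (by simpa using h))]
            simp
          · have hpre : List.isPrefixOf [k] (c :: t) = false := by
              simp [List.isPrefixOf]; exact fun h2 => absurd h2.symm hc
            simp only [PySem.Chars.replace.go, hpre]
            rw [ih t (c :: acc) (by simpa using Nat.lt_succ_iff.mp (by simpa using h))]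
            simp [hc]

lemma replace_single (s : List Char) (k : Char) (new : List Char) :
    PySem.Chars.replace s [k] new = s.flatMap (fun c => if c = k then new else [c]) := by
  simp only [PySem.Chars.replace, List.isEmpty]
  rw [replace_go_single k new s.length s [] (le_refl _)]
  simp

lemma flatMap_comp {α : Type} (l : List α) (f g : α → List α) :
    (l.flatMap f).flatMap g = l.flatMap (fun c => (f c).flatMap g) := by
  induction l with
  | nil => simp
  | cons c t ih => simp [ih]

lemma dict_items :
    (PySem.Dict.ofList
      [((".":String), (" point.":String)), (",", " virgule,"), (";", " point-virgule;"),
       (":", " deux-points:"), ("!", " point d'exclamation!"), ("?", " point d'interrogation?")]).items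
    = [((".":String), (" point.":String)), (",", " virgule,"), (";", " point-virgule;"),
       (":", " deux-points:"), ("!", " point d'exclamation!"), ("?", " point d'interrogation?")] := rfl

-- the six-pass per-character pipeline agrees with the translation table
lemma per_char (c : Char) :
    ((if c = '.' then (" point.").toList else [c]).flatMap (fun c =>
      (if c = ',' then (" virgule,").toList else [c]).flatMap (fun c =>
        (if c = ';' then (" point-virgule;").toList else [c]).flatMap (fun c =>
          (if c = ':' then (" deux-points:").toList else [c]).flatMap (fun c =>
            (if c = '!' then (" point d'exclamation!").toList else [c]).flatMap (fun c =>
              if c = '?' then (" point d'interrogation?").toList else [c]))))))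
      = pvTransChar c := by
  by_cases h1 : c = '.'; · subst h1; decide
  by_cases h2 : c = ','; · subst h2; decide
  by_cases h3 : c = ';'; · subst h3; decide
  by_cases h4 : c = ':'; · subst h4; decide
  by_cases h5 : c = '!'; · subst h5; decide
  by_cases h6 : c = '?'; · subst h6; decide
  simp [pvTransChar, h1, h2, h3, h4, h5, h6]

lemma pvTranslate_eq_flatMap (l : List Char) : pvTranslate l = l.flatMap pvTransChar := by
  induction l with
  | nil => rfl
  | cons c t ih => simp [pvTranslate, ih]

-- ===== VERDICT (by name: the statement is the Claim_ definition above) =====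
theorem replace_punctuation_spec : Claim_equal_replace_punctuation := by
  intro text _
  show replace_punctuation text = replace_punctuation_alt text
  apply String.ext
  have hA : (replace_punctuation text).toList =
      (((((text.toList.flatMap (fun c => if c = '.' then (" point.").toList else [c])).flatMap
        (fun c => if c = ',' then (" virgule,").toList else [c])).flatMap
        (fun c => if c = ';' then (" point-virgule;").toList else [c])).flatMap
        (fun c => if c = ':' then (" deux-points:").toList else [c])).flatMap
        (fun c => if c = '!' then (" point d'exclamation!").toList else [c])).flatMap
        (fun c => if c = '?' then (" point d'interrogation?").toList else [c]) := by
    simp only [replace_punctuation]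
    rw [dict_items]
    simp only [List.foldl_cons, List.foldl_nil, PySem.Str.toList_replace]
    rw [show ("." : String).toList = ['.'] from rfl, show ("," : String).toList = [','] from rfl,
        show (";" : String).toList = [';'] from rfl, show (":" : String).toList = [':'] from rfl,
        show ("!" : String).toList = ['!'] from rfl, show ("?" : String).toList = ['?'] from rfl]
    simp only [replace_single]
  rw [hA]
  simp only [flatMap_comp]
  simp only [replace_punctuation_alt, pvTranslate_eq_flatMap, String.toList_ofList]
  exact List.flatMap_congr (fun c _ => per_char c)
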